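-- pv_equiv track=rewrite | github.com/achyuth8055/CCTAChatBot | app.py | classify_contact_intent
-- ===== SOURCE A (Python) =====
-- def classify_contact_intent(user_query: str, intents: list) -> str:
--     query_lower = user_query.lower()
--
--     consultation_keywords = [
--         'contact', 'phone', 'call', 'email', 'reach', 'get in touch',
--         'speak to', 'talk to', 'consult', 'hire', 'retain',
--         'schedule', 'appointment', 'book', 'meeting',
--         'next step', 'what now', 'how do i proceed', 'get started',
--         'sign up', 'work with you',
--         'office details', 'office info', 'contact details', 'contact info',
--         'your details', 'your info', 'firm details', 'company info'
--     ]
--     if any(kw in query_lower for kw in consultation_keywords):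
--         return 'consultation_ready'
--
--     if 'office' in query_lower and any(w in query_lower for w in ['details', 'info', 'information', 'address', 'location']):
--         return 'consultation_ready'
--
--     contact_intents = ['phone', 'email', 'address', 'contact_methods', 'appointment_booking']
--     if any(intent in intents for intent in contact_intents):
--         return 'consultation_ready'
--
--     service_inquiry_keywords = [
--         'can you help', 'do you handle', 'do you take', 'can you take',
--         'eligible', 'qualify', 'my case', 'my situation',
--         'fee', 'cost', 'price', 'how much', 'charge', 'payment',
--         'free consultation', 'consultation fee',
--         'i need a lawyer', 'i need an attorney', 'i need help with',
--         'represent me', 'help me with'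
--     ]
--     if any(kw in query_lower for kw in service_inquiry_keywords):
--         return 'service_inquiry'
--
--     if any(intent in intents for intent in ['pricing', 'empathy', 'accident_yesno', 'services_yesno']):
--         return 'service_inquiry'
--
--     exploratory_keywords = [
--         'what service', 'what do you', 'what areas', 'practice areas',
--         'what kind of', 'types of cases', 'specializ'
--     ]
--     if any(kw in query_lower for kw in exploratory_keywords):
--         return 'exploratory'
--
--     if 'services_list' in intents:
--         return 'exploratory'
--
--     return 'informational'
-- ===== SOURCE B (Python) =====
-- CONSULTATION_KEYWORDS = [
--     'contact', 'phone', 'call', 'email', 'reach', 'get in touch',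
--     'speak to', 'talk to', 'consult', 'hire', 'retain',
--     'schedule', 'appointment', 'book', 'meeting',
--     'next step', 'what now', 'how do i proceed', 'get started',
--     'sign up', 'work with you',
--     'office details', 'office info', 'contact details', 'contact info',
--     'your details', 'your info', 'firm details', 'company info'
-- ]
--
-- SERVICE_INQUIRY_KEYWORDS = [
--     'can you help', 'do you handle', 'do you take', 'can you take',
--     'eligible', 'qualify', 'my case', 'my situation',
--     'fee', 'cost', 'price', 'how much', 'charge', 'payment',
--     'free consultation', 'consultation fee',
--     'i need a lawyer', 'i need an attorney', 'i need help with',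
--     'represent me', 'help me with'
-- ]
--
-- EXPLORATORY_KEYWORDS = [
--     'what service', 'what do you', 'what areas', 'practice areas',
--     'what kind of', 'types of cases', 'specializ'
-- ]
--
-- # Flat rule tables: each rule carries a numeric priority
-- # (0 = consultation_ready, 1 = service_inquiry, 2 = exploratory).
-- KEYWORD_RULES = (
--     [(kw, 0) for kw in CONSULTATION_KEYWORDS]
--     + [(kw, 1) for kw in SERVICE_INQUIRY_KEYWORDS]
--     + [(kw, 2) for kw in EXPLORATORY_KEYWORDS]
-- )
--
-- INTENT_RULES = (
--     [(name, 0) for name in ['phone', 'email', 'address', 'contact_methods', 'appointment_booking']]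
--     + [(name, 1) for name in ['pricing', 'empathy', 'accident_yesno', 'services_yesno']]
--     + [('services_list', 2)]
-- )
--
-- LABELS = ['consultation_ready', 'service_inquiry', 'exploratory', 'informational']
--
--
-- def classify_contact_intent(user_query: str, intents: list) -> str:
--     """Aggregate ALL matching rules and return the label of the best (minimal)
--     matched priority, instead of short-circuiting through ordered branches.
--     Correct because every rule in a precedence group shares one label, so the
--     first group with any match is exactly the minimal matched priority."""
--     q = user_query.lower()
--     best = 3  # 'informational' unless some rule matches
--     for kw, p in KEYWORD_RULES:
--         if kw in q:
--             best = min(best, p)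
--     if 'office' in q and any(w in q for w in ['details', 'info', 'information', 'address', 'location']):
--         best = min(best, 0)
--     for name, p in INTENT_RULES:
--         if name in intents:
--             best = min(best, p)
--     return LABELS[best]
-- ===== Notes on version B (the rewrite author's own statement) =====
-- stated objective: alternative
-- what changed: Replaces A's ordered early-return branch chain with flat rule tables carrying numeric priorities: B aggregates ALL matching rules with a running min of matched priorities and indexes a label array, instead of short-circuiting at the first matching group.
import Mathlib
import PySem

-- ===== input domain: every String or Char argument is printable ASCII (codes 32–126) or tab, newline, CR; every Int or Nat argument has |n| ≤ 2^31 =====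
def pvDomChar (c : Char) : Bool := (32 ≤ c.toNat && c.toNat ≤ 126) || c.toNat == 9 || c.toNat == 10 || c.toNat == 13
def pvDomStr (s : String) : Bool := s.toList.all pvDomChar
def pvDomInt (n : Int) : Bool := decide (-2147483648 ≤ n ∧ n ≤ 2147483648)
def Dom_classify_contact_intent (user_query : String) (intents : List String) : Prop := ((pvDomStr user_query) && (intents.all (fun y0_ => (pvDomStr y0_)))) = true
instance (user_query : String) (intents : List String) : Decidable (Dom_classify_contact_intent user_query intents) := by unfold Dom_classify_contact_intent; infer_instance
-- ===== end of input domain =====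

-- B replaces A's ordered early-return branch chain with flat priority rule tables aggregated by a running min (objective: alternative decomposition, same cost).

-- ===== PORT A =====
def pvA_consultation_keywords : List String :=
  ["contact", "phone", "call", "email", "reach", "get in touch",
   "speak to", "talk to", "consult", "hire", "retain",
   "schedule", "appointment", "book", "meeting",
   "next step", "what now", "how do i proceed", "get started",
   "sign up", "work with you",
   "office details", "office info", "contact details", "contact info",
   "your details", "your info", "firm details", "company info"]

def pvA_service_inquiry_keywords : List String :=
  ["can you help", "do you handle", "do you take", "can you take",
   "eligible", "qualify", "my case", "my situation",
   "fee", "cost", "price", "how much", "charge", "payment",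
   "free consultation", "consultation fee",
   "i need a lawyer", "i need an attorney", "i need help with",
   "represent me", "help me with"]

def pvA_exploratory_keywords : List String :=
  ["what service", "what do you", "what areas", "practice areas",
   "what kind of", "types of cases", "specializ"]

def classify_contact_intent (user_query : String) (intents : List String) : String :=
  let query_lower := PySem.Str.lower user_query
  if pvA_consultation_keywords.any (fun kw => PySem.Str.isIn kw query_lower) then
    "consultation_ready"
  else if PySem.Str.isIn "office" query_lower &&
          (["details", "info", "information", "address", "location"].any
            (fun w => PySem.Str.isIn w query_lower)) then
    "consultation_ready"
  else if (["phone", "email", "address", "contact_methods", "appointment_booking"].any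
            (fun intent => intents.contains intent)) then
    "consultation_ready"
  else if pvA_service_inquiry_keywords.any (fun kw => PySem.Str.isIn kw query_lower) then
    "service_inquiry"
  else if (["pricing", "empathy", "accident_yesno", "services_yesno"].any
            (fun intent => intents.contains intent)) then
    "service_inquiry"
  else if pvA_exploratory_keywords.any (fun kw => PySem.Str.isIn kw query_lower) then
    "exploratory"
  else if intents.contains "services_list" then
    "exploratory"
  else
    "informational"

-- ===== PORT B =====
-- flat rule tables with numeric priorities, as built in Source B
def pvB_keyword_rules : List (String × Nat) :=
  (pvA_consultation_keywords.map (fun kw => (kw, 0)))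
  ++ (pvA_service_inquiry_keywords.map (fun kw => (kw, 1)))
  ++ (pvA_exploratory_keywords.map (fun kw => (kw, 2)))

def pvB_intent_rules : List (String × Nat) :=
  ((["phone", "email", "address", "contact_methods", "appointment_booking"] : List String).map (fun n => (n, 0)))
  ++ ((["pricing", "empathy", "accident_yesno", "services_yesno"] : List String).map (fun n => (n, 1)))
  ++ [("services_list", 2)]

def pvB_labels : List String :=
  ["consultation_ready", "service_inquiry", "exploratory", "informational"]

def classify_contact_intent_alt (user_query : String) (intents : List String) : String :=
  let q := PySem.Str.lower user_query
  let best1 := pvB_keyword_rules.foldl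
    (fun best r => if PySem.Str.isIn r.1 q then min best r.2 else best) 3
  let best2 := if PySem.Str.isIn "office" q &&
      (["details", "info", "information", "address", "location"].any
        (fun w => PySem.Str.isIn w q)) then min best1 0 else best1
  let best3 := pvB_intent_rules.foldl
    (fun best r => if intents.contains r.1 then min best r.2 else best) best2
  pvB_labels.getD best3 ""

-- ===== PRECONDITION & SPEC =====
def Spec_classify_contact_intent (user_query : String) (intents : List String) (out : String) : Prop := out = classify_contact_intent_alt user_query intents
instance (user_query : String) (intents : List String) (out : String) : Decidable (Spec_classify_contact_intent user_query intents out) := by unfold Spec_classify_contact_intent; infer_instance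

-- ===== CLAIM (what is proved, stated in full; the proofs are below) =====
def Claim_equal_classify_contact_intent : Prop := ∀ (user_query : String) (intents : List String), Dom_classify_contact_intent user_query intents → Spec_classify_contact_intent user_query intents (classify_contact_intent user_query intents)

-- ===== LEMMAS AND PROOFS =====
-- folding min over a constant-priority group is 'if any element matches then min with that priority'
theorem foldl_min_any {α : Type} (pred : α → Bool) (l : List α) (p a : Nat) :
    l.foldl (fun best x => if pred x then min best p else best) a
    = if l.any pred then min a p else a := by
  induction l generalizing a with
  | nil => simp
  | cons x xs ih =>
    simp only [List.foldl_cons, List.any_cons]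
    by_cases h : pred x = true
    · simp only [h, ih, Bool.true_or]
      split_ifs <;> omega
    · simp [h, ih]

theorem classify_eq (user_query : String) (intents : List String) :
    classify_contact_intent user_query intents = classify_contact_intent_alt user_query intents := by
  unfold classify_contact_intent classify_contact_intent_alt pvB_keyword_rules pvB_intent_rules pvB_labels
  simp only [List.foldl_append, List.foldl_map, foldl_min_any]
  simp only [List.foldl_cons, List.foldl_nil]
  split_ifs <;> rfl

-- ===== VERDICT (by name: the statement is the Claim_ definition above) =====
theorem classify_contact_intent_spec : Claim_equal_classify_contact_intent := by
  intro q i _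
  exact classify_eq q i
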